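-- pv_equiv track=rewrite | github.com/MemberA2600/Fortari2600 | src/View/RawDataCooker.py | getTagsReturnLabelWithoutThem
-- ===== SOURCE A (Python) =====
-- def getTagsReturnLabelWithoutThem(label):
--     tagStart = -1
--     tagEnd = -1
--     searchForEnd = False
--
--     tags = []
--
--     while True:
--         if searchForEnd == False:
--            tagStart += 1
--            if tagStart >= len(label): break
--
--            if label[tagStart] == "#":
--               searchForEnd = True
--               tagEnd       = tagStart
--
--         else:
--            tagEnd   += 1
--            if tagEnd >= len(label): break
--
--            if label[tagEnd] == "#":
--               tags.append(label[tagStart:tagEnd + 1])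
--               label        = label[:tagStart] + label[tagEnd + 1:]
--               tagStart     = -1
--               tagEnd       = -1
--               searchForEnd = False
--
--     return tags, label
-- ===== SOURCE B (Python) =====
-- def getTagsReturnLabelWithoutThem(label):
--     tags = []
--     kept = []
--     pending = None
--     for ch in label:
--         if pending is None:
--             if ch == "#":
--                 pending = [ch]
--             else:
--                 kept.append(ch)
--         else:
--             pending.append(ch)
--             if ch == "#":
--                 tags.append("".join(pending))
--                 pending = None
--     if pending is not None:
--         kept.extend(pending)
--     return tags, "".join(kept)
-- ===== Notes on version B (the rewrite author's own statement) =====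
-- stated objective: faster
-- what changed: A repeatedly rescans the label from position 0, splicing each found #...# tag out of the string before restarting; B makes a single left-to-right pass with a pending buffer, collecting closed tags and kept characters in one traversal.
import Mathlib
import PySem

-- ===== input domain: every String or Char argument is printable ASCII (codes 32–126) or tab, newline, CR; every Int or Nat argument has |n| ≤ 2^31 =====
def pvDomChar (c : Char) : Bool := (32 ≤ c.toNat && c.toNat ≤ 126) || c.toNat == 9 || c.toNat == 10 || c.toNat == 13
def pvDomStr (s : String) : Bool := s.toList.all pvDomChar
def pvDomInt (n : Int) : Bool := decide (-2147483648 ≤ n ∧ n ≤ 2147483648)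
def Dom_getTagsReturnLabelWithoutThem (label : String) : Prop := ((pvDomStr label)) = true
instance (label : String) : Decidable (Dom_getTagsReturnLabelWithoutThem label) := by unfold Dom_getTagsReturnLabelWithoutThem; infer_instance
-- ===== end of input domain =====

-- B replaces A's restart-from-scratch scan-and-splice state machine by a single left-to-right
-- pass with a pending buffer (objective: faster on tag-heavy labels; one pass, no re-scans).

-- ===== PORT A =====
-- Invariant carried only for termination of the while-True loop (Python's loop terminates for
-- the same reason); it does not alter the computation.
def AInv (len : Nat) (ts te : Int) (search : Bool) : Prop :=
  if search then 0 ≤ ts ∧ ts ≤ te ∧ te ≤ (len : Int) else -1 ≤ ts ∧ te = -1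

theorem aInv_fresh (len : Nat) : AInv len (-1) (-1) false := by simp [AInv]

theorem aInv_stepF {len : Nat} {ts te : Int} (h : AInv len ts te false) :
    AInv len (ts + 1) te false := by simp [AInv] at h ⊢; omega

theorem aInv_open {len : Nat} {ts te : Int} (h : AInv len ts te false)
    (hbr : ¬ (len : Int) ≤ ts + 1) : AInv len (ts + 1) (ts + 1) true := by
  simp [AInv] at h ⊢; omega

theorem aInv_stepT {len : Nat} {ts te : Int} (h : AInv len ts te true)
    (hbr : ¬ (len : Int) ≤ te + 1) : AInv len ts (te + 1) true := by
  simp [AInv] at h ⊢; omega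

theorem aDec_stepF {len : Nat} {ts te : Int} (h : AInv len ts te false)
    (hbr : ¬ (len : Int) ≤ ts + 1) :
    (2 * (len : Int) + 2 - (ts + 1) - te).toNat < (2 * (len : Int) + 2 - ts - te).toNat := by
  simp [AInv] at h
  rw [Int.toNat_lt_toNat (by omega)]; omega

theorem aDec_open {len : Nat} {ts te : Int} (h : AInv len ts te false)
    (hbr : ¬ (len : Int) ≤ ts + 1) :
    (2 * (len : Int) + 2 - (ts + 1) - (ts + 1)).toNat < (2 * (len : Int) + 2 - ts - te).toNat := by
  simp [AInv] at h
  rw [Int.toNat_lt_toNat (by omega)]; omega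

theorem aDec_stepT {len : Nat} {ts te : Int} (h : AInv len ts te true)
    (hbr : ¬ (len : Int) ≤ te + 1) :
    (2 * (len : Int) + 2 - ts - (te + 1)).toNat < (2 * (len : Int) + 2 - ts - te).toNat := by
  simp [AInv] at h
  rw [Int.toNat_lt_toNat (by omega)]; omega

theorem aDec_close (label : List Char) {ts te : Int} (h : AInv label.length ts te true)
    (hbr : ¬ (label.length : Int) ≤ te + 1) :
    (PySem.List.slice label none (some ts) ++
      PySem.List.slice label (some (te + 1 + 1)) none).length < label.length := by
  simp [AInv] at h
  rw [PySem.List.slice_to label (by omega), PySem.List.slice_from label (by omega)]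
  simp only [List.length_append, List.length_take, List.length_drop]
  rw [Nat.min_eq_left (by omega)]
  omega

-- the while-True loop of A, step for step: ts/te are tagStart/tagEnd, search is searchForEnd
def aLoop (label : List Char) (tags : List (List Char)) (ts te : Int) (search : Bool)
    (h : AInv label.length ts te search) : List (List Char) × List Char :=
  if hs : search = false then
    -- tagStart += 1; if tagStart >= len(label): break
    if hbr : (label.length : Int) ≤ ts + 1 then (tags, label)
    -- if label[tagStart] == "#": searchForEnd = True; tagEnd = tagStart
    else if _hc : PySem.List.pyGet? label (ts + 1) = some '#' then
      aLoop label tags (ts + 1) (ts + 1) true (aInv_open (hs ▸ h) hbr)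
    else
      aLoop label tags (ts + 1) te false (aInv_stepF (hs ▸ h))
  else
    -- tagEnd += 1; if tagEnd >= len(label): break
    if hbr : (label.length : Int) ≤ te + 1 then (tags, label)
    -- if label[tagEnd] == "#": append label[tagStart:tagEnd+1], label = label[:tagStart] + label[tagEnd+1:], reset
    else if _hc : PySem.List.pyGet? label (te + 1) = some '#' then
      aLoop (PySem.List.slice label none (some ts) ++ PySem.List.slice label (some (te + 1 + 1)) none)
        (tags ++ [PySem.List.slice label (some ts) (some (te + 1 + 1))]) (-1) (-1) false
        (aInv_fresh _)
    else
      aLoop label tags ts (te + 1) true (aInv_stepT (eq_true_of_ne_false hs ▸ h) hbr)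
  termination_by (label.length, (2 * (label.length : Int) + 2 - ts - te).toNat)
  decreasing_by
    · exact Prod.Lex.right _ (aDec_open (hs ▸ h) hbr)
    · exact Prod.Lex.right _ (aDec_stepF (hs ▸ h) hbr)
    · exact Prod.Lex.left _ _ (aDec_close label (eq_true_of_ne_false hs ▸ h) hbr)
    · exact Prod.Lex.right _ (aDec_stepT (eq_true_of_ne_false hs ▸ h) hbr)

def getTagsReturnLabelWithoutThem (label : String) : List String × String :=
  let r := aLoop label.toList [] (-1) (-1) false (aInv_fresh _)
  (r.1.map (fun t => String.ofList t), String.ofList r.2)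

-- ===== PORT B =====
-- one step of B's for-loop over the characters: state = (tags, kept, pending)
def bStep (st : List (List Char) × List Char × Option (List Char)) (ch : Char) :
    List (List Char) × List Char × Option (List Char) :=
  match st with
  | (tags, kept, none) =>
      if ch = '#' then (tags, kept, some [ch]) else (tags, kept ++ [ch], none)
  | (tags, kept, some buf) =>
      if ch = '#' then (tags ++ [buf ++ [ch]], kept, none) else (tags, kept, some (buf ++ [ch]))

def getTagsReturnLabelWithoutThem_alt (label : String) : List String × String :=
  let st := label.toList.foldl bStep ([], [], none)
  let kept := match st.2.2 with
    | some p => st.2.1 ++ p      -- if pending is not None: kept.extend(pending)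
    | none => st.2.1
  (st.1.map (fun t => String.ofList t), String.ofList kept)

-- ===== PRECONDITION & SPEC =====
def Spec_getTagsReturnLabelWithoutThem (label : String) (out : List String × String) : Prop := out = getTagsReturnLabelWithoutThem_alt label
instance (label : String) (out : List String × String) : Decidable (Spec_getTagsReturnLabelWithoutThem label out) := by unfold Spec_getTagsReturnLabelWithoutThem; infer_instance

-- ===== CLAIM (what is proved, stated in full; the proofs are below) =====
def Claim_equal_getTagsReturnLabelWithoutThem : Prop := ∀ (label : String), Dom_getTagsReturnLabelWithoutThem label → Spec_getTagsReturnLabelWithoutThem label (getTagsReturnLabelWithoutThem label)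

-- ===== LEMMAS AND PROOFS =====

-- first-occurrence decomposition of a list containing '#'
lemma exists_first_hash (xs : List Char) (hx : '#' ∈ xs) :
    ∃ p s, xs = p ++ '#' :: s ∧ '#' ∉ p := by
  induction xs with
  | nil => cases hx
  | cons c t ih =>
    by_cases hc : c = '#'
    · exact ⟨[], t, by simp [hc], by simp⟩
    · have ht : '#' ∈ t := by
        rcases List.mem_cons.mp hx with h | h
        · exact absurd h.symm hc
        · exact h
      obtain ⟨p, s, rfl, hp⟩ := ih ht
      exact ⟨c :: p, s, rfl, by
        simp only [List.mem_cons, not_or]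
        exact ⟨fun e => hc e.symm, hp⟩⟩

-- ---------- B-side lemmas ----------

-- finalisation of B's state (the 'if pending is not None' epilogue), and the whole pass
def bFin (st : List (List Char) × List Char × Option (List Char)) : List (List Char) × List Char :=
  match st with
  | (tags, kept, none) => (tags, kept)
  | (tags, kept, some p) => (tags, kept ++ p)

def bRun (xs : List Char) : List (List Char) × List Char := bFin (xs.foldl bStep ([], [], none))

lemma foldl_bStep_acc (xs : List Char) : ∀ (tags : List (List Char)) (kept : List Char)
    (buf : Option (List Char)),
    xs.foldl bStep (tags, kept, buf) =
      (tags ++ (xs.foldl bStep ([], [], buf)).1,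
       kept ++ (xs.foldl bStep ([], [], buf)).2.1,
       (xs.foldl bStep ([], [], buf)).2.2) := by
  induction xs with
  | nil => simp
  | cons c rest ih =>
    intro tags kept buf
    cases buf with
    | none =>
      by_cases hc : c = '#'
      · subst hc
        simp only [List.foldl_cons, bStep, if_true]
        rw [ih tags kept (some ['#'])]
      · simp only [List.foldl_cons, bStep, if_neg hc, List.nil_append]
        rw [ih tags (kept ++ [c]) none, ih [] [c] none]
        simp
    | some b =>
      by_cases hc : c = '#'
      · subst hc
        simp only [List.foldl_cons, bStep, if_true, List.nil_append]
        rw [ih (tags ++ [b ++ ['#']]) kept none, ih [b ++ ['#']] [] none]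
        simp
      · simp only [List.foldl_cons, bStep, if_neg hc]
        rw [ih tags kept (some (b ++ [c]))]

lemma foldl_bStep_pending (m : List Char) : ∀ (tags : List (List Char)) (kept buf : List Char),
    '#' ∉ m → m.foldl bStep (tags, kept, some buf) = (tags, kept, some (buf ++ m)) := by
  induction m with
  | nil => simp
  | cons c rest ih =>
    intro tags kept buf hm
    have hc : c ≠ '#' := fun e => hm (by simp [e])
    simp only [List.foldl_cons, bStep, if_neg hc]
    rw [ih _ _ _ (fun e => hm (by simp [e]))]
    simp

lemma bRun_cons_ne (c : Char) (xs : List Char) (hc : c ≠ '#') :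
    bRun (c :: xs) = ((bRun xs).1, c :: (bRun xs).2) := by
  unfold bRun
  simp only [List.foldl_cons, bStep, if_neg hc, List.nil_append]
  rw [foldl_bStep_acc xs [] [c] none]
  rcases hE : xs.foldl bStep ([], [], none) with ⟨t, k, p⟩
  cases p <;> simp [bFin]

lemma bRun_prefix (p xs : List Char) (hp : '#' ∉ p) :
    bRun (p ++ xs) = ((bRun xs).1, p ++ (bRun xs).2) := by
  induction p with
  | nil => simp
  | cons c rest ih =>
    have hc : c ≠ '#' := fun e => hp (by simp [e])
    rw [List.cons_append, bRun_cons_ne c (rest ++ xs) hc,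
      ih (fun hm => hp (by simp [hm]))]
    simp

lemma bRun_nohash (xs : List Char) (hx : '#' ∉ xs) : bRun xs = ([], xs) := by
  have := bRun_prefix xs [] hx
  simpa [bRun, bFin] using this

lemma bRun_open (p s : List Char) (hp : '#' ∉ p) (hs : '#' ∉ s) :
    bRun (p ++ '#' :: s) = ([], p ++ '#' :: s) := by
  rw [bRun_prefix p ('#' :: s) hp]
  have h1 : bRun ('#' :: s) = ([], '#' :: s) := by
    unfold bRun
    simp only [List.foldl_cons, bStep, if_true]
    rw [foldl_bStep_pending s [] [] ['#'] hs]
    simp [bFin]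
  rw [h1]

lemma bRun_round (p m xs : List Char) (hp : '#' ∉ p) (hm : '#' ∉ m) :
    bRun (p ++ '#' :: (m ++ '#' :: xs)) =
      (('#' :: (m ++ ['#'])) :: (bRun xs).1, p ++ (bRun xs).2) := by
  rw [bRun_prefix p _ hp]
  have h1 : bRun ('#' :: (m ++ '#' :: xs)) =
      (('#' :: (m ++ ['#'])) :: (bRun xs).1, (bRun xs).2) := by
    unfold bRun
    simp only [List.foldl_cons, bStep, if_true, List.foldl_append]
    rw [foldl_bStep_pending m [] [] ['#'] hm]
    simp only [List.nil_append]
    rw [foldl_bStep_acc xs [(['#'] ++ m) ++ ['#']] [] none]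
    rcases hE : xs.foldl bStep ([], [], none) with ⟨t, k, p⟩
    cases p <;> simp [bFin]
  rw [h1]

-- ---------- A-side lemmas ----------

lemma aLoop_stepF_end (label : List Char) (tags : List (List Char)) (ts : Int)
    (h : AInv label.length ts (-1) false) (hge : (label.length : Int) ≤ ts + 1) :
    aLoop label tags ts (-1) false h = (tags, label) := by
  rw [aLoop, dif_pos rfl, dif_pos hge]

lemma aLoop_stepF_cont (label : List Char) (tags : List (List Char)) (ts ts' : Int)
    (h : AInv label.length ts (-1) false) (h' : AInv label.length ts' (-1) false)
    (hlt : ts + 1 < (label.length : Int))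
    (hc : PySem.List.pyGet? label (ts + 1) ≠ some '#') (e : ts' = ts + 1) :
    aLoop label tags ts (-1) false h = aLoop label tags ts' (-1) false h' := by
  subst e
  rw [aLoop, dif_pos rfl, dif_neg (by omega), dif_neg hc]

lemma aLoop_stepF_open (label : List Char) (tags : List (List Char)) (ts ts' : Int)
    (h : AInv label.length ts (-1) false) (h' : AInv label.length ts' ts' true)
    (hlt : ts + 1 < (label.length : Int))
    (hc : PySem.List.pyGet? label (ts + 1) = some '#') (e : ts' = ts + 1) :
    aLoop label tags ts (-1) false h = aLoop label tags ts' ts' true h' := by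
  subst e
  rw [aLoop, dif_pos rfl, dif_neg (by omega), dif_pos hc]

lemma aLoop_stepT_end (label : List Char) (tags : List (List Char)) (ts te : Int)
    (h : AInv label.length ts te true) (hge : (label.length : Int) ≤ te + 1) :
    aLoop label tags ts te true h = (tags, label) := by
  rw [aLoop, dif_neg (by simp), dif_pos hge]

lemma aLoop_stepT_cont (label : List Char) (tags : List (List Char)) (ts te te' : Int)
    (h : AInv label.length ts te true) (h' : AInv label.length ts te' true)
    (hlt : te + 1 < (label.length : Int))
    (hc : PySem.List.pyGet? label (te + 1) ≠ some '#') (e : te' = te + 1) :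
    aLoop label tags ts te true h = aLoop label tags ts te' true h' := by
  subst e
  rw [aLoop, dif_neg (by simp), dif_neg (by omega), dif_neg hc]

lemma aLoop_stepT_close (label label' : List Char) (tags : List (List Char)) (t' : List Char)
    (ts te : Int)
    (h : AInv label.length ts te true) (h' : AInv label'.length (-1) (-1) false)
    (hlt : te + 1 < (label.length : Int))
    (hc : PySem.List.pyGet? label (te + 1) = some '#')
    (el : label' = PySem.List.slice label none (some ts) ++ PySem.List.slice label (some (te + 1 + 1)) none)
    (et : t' = PySem.List.slice label (some ts) (some (te + 1 + 1))) :
    aLoop label tags ts te true h = aLoop label' (tags ++ [t']) (-1) (-1) false h' := by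
  subst el et
  rw [aLoop, dif_neg (by simp), dif_neg (by omega), dif_pos hc]

lemma aLoop_scanF : ∀ (q p r label : List Char) (tags : List (List Char)) (ts ts' : Int)
    (h : AInv label.length ts (-1) false) (h' : AInv label.length ts' (-1) false),
    label = p ++ q ++ r → '#' ∉ q → ts = (p.length : Int) - 1 →
    ts' = (p.length : Int) + q.length - 1 →
    aLoop label tags ts (-1) false h = aLoop label tags ts' (-1) false h' := by
  intro q
  induction q with
  | nil =>
    intro p r label tags ts ts' h h' hl hq hts hts'
    have e : ts' = ts := by rw [hts, hts']; simp
    subst e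
    rfl
  | cons c q' ih =>
    intro p r label tags ts ts' h h' hl hq hts hts'
    have hc : c ≠ '#' := fun e => hq (by simp [e])
    have hlen : (label.length : Int) = p.length + (q'.length + 1) + r.length := by
      subst hl; simp; ring
    have h2 : AInv label.length (ts + 1) (-1) false := by
      simp [AInv] at h ⊢; omega
    refine (aLoop_stepF_cont label tags ts (ts + 1) h h2 (by omega)
      (by subst hl hts
          rw [show ((p.length : Int) - 1 + 1) = (p.length : Int) by omega,
            show p ++ (c :: q') ++ r = p ++ c :: (q' ++ r) by simp,
            PySem.List.pyGet?_append_length]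
          simp [hc]) rfl).trans ?_
    refine ih (p ++ [c]) r label tags (ts + 1) ts' h2 h' (by subst hl; simp)
      (fun hm => hq (by simp [hm])) (by subst hts; simp) ?_
    rw [hts']; simp; ring

lemma aLoop_scanT : ∀ (m u r label : List Char) (tags : List (List Char)) (ts te te' : Int)
    (h : AInv label.length ts te true) (h' : AInv label.length ts te' true),
    label = u ++ m ++ r → '#' ∉ m → te = (u.length : Int) - 1 →
    te' = (u.length : Int) + m.length - 1 →
    aLoop label tags ts te true h = aLoop label tags ts te' true h' := by
  intro m
  induction m with
  | nil =>
    intro u r label tags ts te te' h h' hl hm hte hte'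
    have e : te' = te := by rw [hte, hte']; simp
    subst e
    rfl
  | cons c m' ih =>
    intro u r label tags ts te te' h h' hl hm hte hte'
    have hc : c ≠ '#' := fun e => hm (by simp [e])
    have hlen : (label.length : Int) = u.length + (m'.length + 1) + r.length := by
      subst hl; simp; ring
    have h2 : AInv label.length ts (te + 1) true := by
      simp [AInv] at h ⊢; omega
    refine (aLoop_stepT_cont label tags ts te (te + 1) h h2 (by omega)
      (by subst hl hte
          rw [show ((u.length : Int) - 1 + 1) = (u.length : Int) by omega,
            show u ++ (c :: m') ++ r = u ++ c :: (m' ++ r) by simp,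
            PySem.List.pyGet?_append_length]
          simp [hc]) rfl).trans ?_
    refine ih (u ++ [c]) r label tags ts (te + 1) te' h2 h' (by subst hl; simp)
      (fun hmm => hm (by simp [hmm])) (by subst hte; simp) ?_
    rw [hte']; simp; ring

lemma aFresh_nohash (label : List Char) (tags : List (List Char))
    (h : AInv label.length (-1) (-1) false) (hx : '#' ∉ label) :
    aLoop label tags (-1) (-1) false h = (tags, label) := by
  have h2 : AInv label.length ((label.length : Int) - 1) (-1) false := by
    simp [AInv]; omega
  refine (aLoop_scanF label [] [] label tags (-1) ((label.length : Int) - 1) h h2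
    (by simp) hx (by simp) (by simp)).trans ?_
  exact aLoop_stepF_end label tags _ h2 (by omega)

lemma aFresh_open (p s : List Char) (tags : List (List Char))
    (h : AInv (p ++ '#' :: s).length (-1) (-1) false) (hp : '#' ∉ p) (hs : '#' ∉ s) :
    aLoop (p ++ '#' :: s) tags (-1) (-1) false h = (tags, p ++ '#' :: s) := by
  have hlen : (p ++ '#' :: s).length = p.length + 1 + s.length := by simp; omega
  have h1 : AInv (p ++ '#' :: s).length ((p.length : Int) - 1) (-1) false := by
    simp [AInv]; omega
  have h2 : AInv (p ++ '#' :: s).length (p.length : Int) (p.length : Int) true := by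
    simp [AInv]; omega
  have h3 : AInv (p ++ '#' :: s).length (p.length : Int) ((p.length : Int) + s.length) true := by
    simp [AInv]
  refine (aLoop_scanF p [] ('#' :: s) _ tags (-1) ((p.length : Int) - 1) h h1
    (by simp) hp (by simp) (by simp)).trans ?_
  refine (aLoop_stepF_open _ tags _ (p.length : Int) h1 h2
    (by rw [hlen]; omega)
    (by rw [show ((p.length : Int) - 1 + 1) = (p.length : Int) by omega,
          PySem.List.pyGet?_append_length])
    (by omega)).trans ?_
  refine (aLoop_scanT s (p ++ ['#']) [] _ tags (p.length : Int) (p.length : Int)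
    ((p.length : Int) + s.length) h2 h3 (by simp) hs (by simp) (by simp; omega)).trans ?_
  exact aLoop_stepT_end _ tags _ _ h3 (by rw [hlen]; omega)

lemma aFresh_round (p m r : List Char) (tags : List (List Char))
    (h : AInv (p ++ '#' :: (m ++ '#' :: r)).length (-1) (-1) false)
    (h' : AInv (p ++ r).length (-1) (-1) false) (hp : '#' ∉ p) (hm : '#' ∉ m) :
    aLoop (p ++ '#' :: (m ++ '#' :: r)) tags (-1) (-1) false h =
      aLoop (p ++ r) (tags ++ ['#' :: (m ++ ['#'])]) (-1) (-1) false h' := by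
  have hlen : (p ++ '#' :: (m ++ '#' :: r)).length = p.length + m.length + r.length + 2 := by
    simp; omega
  have h1 : AInv (p ++ '#' :: (m ++ '#' :: r)).length ((p.length : Int) - 1) (-1) false := by
    simp [AInv]; omega
  have h2 : AInv (p ++ '#' :: (m ++ '#' :: r)).length (p.length : Int) (p.length : Int) true := by
    simp [AInv]; omega
  have h3 : AInv (p ++ '#' :: (m ++ '#' :: r)).length (p.length : Int)
      ((p.length : Int) + m.length) true := by
    simp [AInv]; omega
  refine (aLoop_scanF p [] ('#' :: (m ++ '#' :: r)) _ tags (-1) ((p.length : Int) - 1) h h1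
    (by simp) hp (by simp) (by simp)).trans ?_
  refine (aLoop_stepF_open _ tags _ (p.length : Int) h1 h2
    (by rw [hlen]; omega)
    (by rw [show ((p.length : Int) - 1 + 1) = (p.length : Int) by omega,
          PySem.List.pyGet?_append_length])
    (by omega)).trans ?_
  refine (aLoop_scanT m (p ++ ['#']) ('#' :: r) _ tags (p.length : Int) (p.length : Int)
    ((p.length : Int) + m.length) h2 h3 (by simp) hm (by simp) (by simp; omega)).trans ?_
  refine aLoop_stepT_close _ (p ++ r) tags ('#' :: (m ++ ['#'])) (p.length : Int)
    ((p.length : Int) + m.length) h3 h' (by rw [hlen]; omega)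
    (by rw [show ((p.length : Int) + m.length + 1) = (((p ++ '#' :: m).length : Nat) : Int) by
          simp; ring,
        show p ++ '#' :: (m ++ '#' :: r) = (p ++ '#' :: m) ++ '#' :: r by simp,
        PySem.List.pyGet?_append_length]) ?_ ?_
  · rw [show ((p.length : Int) + m.length + 1 + 1) = ((p.length + m.length + 2 : Nat) : Int) by
        push_cast; ring,
      PySem.List.slice_to_natCast, PySem.List.slice_from_natCast, List.take_left,
      show p ++ '#' :: (m ++ '#' :: r) = (p ++ '#' :: m ++ ['#']) ++ r by simp,
      List.drop_left' (by simp; omega)]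
  · rw [show ((p.length : Int) + m.length + 1 + 1) = ((p.length + m.length + 2 : Nat) : Int) by
        push_cast; ring,
      PySem.List.slice_natCast, List.drop_left,
      show ('#' :: (m ++ '#' :: r)) = ('#' :: (m ++ ['#'])) ++ r by simp,
      List.take_left' (by simp; omega)]

-- ---------- main equivalence on char lists ----------

lemma aFresh_eq_bRun : ∀ (n : Nat) (label : List Char) (tags : List (List Char))
    (h : AInv label.length (-1) (-1) false), label.length ≤ n →
    aLoop label tags (-1) (-1) false h = (tags ++ (bRun label).1, (bRun label).2) := by
  intro n
  induction n with
  | zero =>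
    intro label tags h hlen
    have : label = [] := List.eq_nil_of_length_eq_zero (Nat.le_zero.mp hlen)
    subst this
    rw [aFresh_nohash [] tags h (by simp), bRun_nohash [] (by simp)]
    simp
  | succ n ih =>
    intro label tags h hlen
    by_cases hmem : '#' ∈ label
    · obtain ⟨p, s, rfl, hp⟩ := exists_first_hash label hmem
      by_cases hmem2 : '#' ∈ s
      · obtain ⟨m, r, rfl, hm⟩ := exists_first_hash s hmem2
        have h' : AInv (p ++ r).length (-1) (-1) false := by simp [AInv]
        rw [aFresh_round p m r tags h h' hp hm,
          ih (p ++ r) (tags ++ ['#' :: (m ++ ['#'])]) h' (by simp at hlen ⊢; omega),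
          bRun_round p m r hp hm, bRun_prefix p r hp]
        simp
      · rw [aFresh_open p s tags h hp hmem2, bRun_open p s hp hmem2]
        simp
    · rw [aFresh_nohash label tags h hmem, bRun_nohash label hmem]
      simp

-- ===== VERDICT (by name: the statement is the Claim_ definition above) =====
theorem getTagsReturnLabelWithoutThem_spec : Claim_equal_getTagsReturnLabelWithoutThem := by
  intro label _
  unfold Spec_getTagsReturnLabelWithoutThem getTagsReturnLabelWithoutThem
    getTagsReturnLabelWithoutThem_alt
  rw [aFresh_eq_bRun label.toList.length label.toList [] (aInv_fresh _) le_rfl]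
  unfold bRun
  rcases hE : label.toList.foldl bStep ([], [], none) with ⟨t, k, pnd⟩
  cases pnd <;> simp [bFin]
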